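-- pv_equiv track=rewrite | github.com/yonghee12/algorithm_study | 01_programmers/level1/42840_모의고사2.py | solution
-- ===== SOURCE A (Python) =====
-- def solution(answers):
--     students = {1: [1, 2, 3, 4, 5],
--                 2: [2, 1, 2, 3, 2, 4, 2, 5],
--                 3: [3, 3, 1, 1, 2, 2, 4, 4, 5, 5]}
--     scores = {1: 0, 2: 0, 3: 0}
--
--     for idx, ans in enumerate(answers):
--         for s_num, series in students.items():
--             if series[idx % len(series)] == ans:
--                 scores[s_num] += 1
--
--     max_score = max(scores.values())
--     return [s_num for s_num, score in scores.items() if score == max_score]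
-- ===== SOURCE B (Python) =====
-- def solution(answers):
--     p1 = [1, 2, 3, 4, 5]
--     p2 = [2, 1, 2, 3, 2, 4, 2, 5]
--     p3 = [3, 3, 1, 1, 2, 2, 4, 4, 5, 5]
--     # stage 1: compress the sheet into a histogram over (position mod 40, answer);
--     # 40 = lcm(5, 8, 10), so a pattern's reply at position i depends only on i mod 40
--     hist = {}
--     for i, a in enumerate(answers):
--         k = (i % 40, a)
--         hist[k] = hist.get(k, 0) + 1
--     # stage 2: score the three patterns from the (at most 40*#values) histogram cells
--     s1 = s2 = s3 = 0
--     for (r, a), c in hist.items():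
--         if p1[r % 5] == a:
--             s1 += c
--         if p2[r % 8] == a:
--             s2 += c
--         if p3[r % 10] == a:
--             s3 += c
--     best = max(s1, s2, s3)
--     return [n for n, s in ((1, s1), (2, s2), (3, s3)) if s == best]
-- ===== Notes on version B (the rewrite author's own statement) =====
-- stated objective: alternative
-- what changed: B first compresses the answer sheet into a histogram keyed by (position mod 40, answer) -- 40 = lcm(5,8,10), the pattern lengths -- and then scores the three patterns from the at-most-40*#values histogram cells, instead of A's single pass that compares every individual answer against all three patterns.
import Mathlib
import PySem

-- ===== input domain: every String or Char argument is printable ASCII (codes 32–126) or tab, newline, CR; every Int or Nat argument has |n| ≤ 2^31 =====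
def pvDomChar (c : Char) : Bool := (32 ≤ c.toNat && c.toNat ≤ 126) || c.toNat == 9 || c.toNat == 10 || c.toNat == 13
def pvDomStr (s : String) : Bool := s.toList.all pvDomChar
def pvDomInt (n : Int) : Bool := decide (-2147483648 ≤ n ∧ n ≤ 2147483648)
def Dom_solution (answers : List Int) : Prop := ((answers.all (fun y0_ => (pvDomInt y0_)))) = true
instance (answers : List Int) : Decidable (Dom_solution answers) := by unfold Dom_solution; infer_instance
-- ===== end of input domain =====

-- B first compresses the answer sheet into a histogram keyed by (index mod 40, answer)
-- (40 = lcm of the three pattern lengths), then scores the three patterns from the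
-- histogram cells, instead of A's per-answer pass updating all three counters.

-- ===== PORT A =====
def solution (answers : List Int) : List Int :=
  let students : PySem.Dict Int (List Int) :=
    PySem.Dict.mk [(1, [1, 2, 3, 4, 5]),
                   (2, [2, 1, 2, 3, 2, 4, 2, 5]),
                   (3, [3, 3, 1, 1, 2, 2, 4, 4, 5, 5])]
  let scores0 : PySem.Dict Int Int := PySem.Dict.mk [(1, 0), (2, 0), (3, 0)]
  let scores := (PySem.List.enumerate answers).foldl (fun sc q =>
      students.items.foldl (fun sc st =>
        if PySem.List.pyGet? st.2 (PySem.Int.mod q.1 (st.2.length : Int)) == some q.2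
        then sc.modify st.1 0 (· + 1)   -- the key is always present (fixed keys 1,2,3): scores[s_num] += 1
        else sc) sc) scores0
  -- scores.values always has exactly 3 elements, so max? is some; the .getD 0 branch is unreachable
  let max_score := (PySem.List.max? scores.values (fun x => x)).getD 0
  (scores.items.filter (fun p => p.2 == max_score)).map (·.1)

-- ===== PORT B =====
-- the histogram key of an enumerated answer: (position mod 40, answer)
def pvKey (q : Int × Int) : Int × Int := (PySem.Int.mod q.1 40, q.2)

-- does pattern `pat` (of length `len`) reply `q.2` at a position ≡ q.1 (mod 40)?  pat[r % len] == a
def pvMatch (pat : List Int) (len : Int) (q : Int × Int) : Bool :=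
  PySem.List.pyGet? pat (PySem.Int.mod q.1 len) == some q.2

def solution_alt (answers : List Int) : List Int :=
  let p1 : List Int := [1, 2, 3, 4, 5]
  let p2 : List Int := [2, 1, 2, 3, 2, 4, 2, 5]
  let p3 : List Int := [3, 3, 1, 1, 2, 2, 4, 4, 5, 5]
  -- stage 1: hist[(i % 40, a)] = hist.get(k, 0) + 1 over enumerate(answers)
  let hist := (PySem.List.enumerate answers).foldl
      (fun d q => d.insert (pvKey q) (d.getD (pvKey q) 0 + 1)) PySem.Dict.empty
  -- stage 2: the three scores from the histogram cells
  let s := hist.items.foldl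
      (fun (s : Int × Int × Int) q =>
        (if pvMatch p1 5 q.1 then s.1 + q.2 else s.1,
         if pvMatch p2 8 q.1 then s.2.1 + q.2 else s.2.1,
         if pvMatch p3 10 q.1 then s.2.2 + q.2 else s.2.2)) (0, 0, 0)
  let best := max s.1 (max s.2.1 s.2.2)
  (([(1, s.1), (2, s.2.1), (3, s.2.2)] : List (Int × Int)).filter (fun q => q.2 == best)).map (·.1)

-- ===== PRECONDITION & SPEC =====
def Spec_solution (answers : List Int) (out : List Int) : Prop := out = solution_alt answers
instance (answers : List Int) (out : List Int) : Decidable (Spec_solution answers out) := by unfold Spec_solution; infer_instance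

-- ===== CLAIM (what is proved, stated in full; the proofs are below) =====
def Claim_equal_solution : Prop := ∀ (answers : List Int), Dom_solution answers → Spec_solution answers (solution answers)

-- ===== LEMMAS AND PROOFS =====

-- the number of matches of `answers` (enumerated from s) against `pat` under the idx % len rule
def pvCnt (pat answers : List Int) (s : Int) : Int :=
  ((PySem.List.enumerate answers s).countP
    (fun q => PySem.List.pyGet? pat (PySem.Int.mod q.1 (pat.length : Int)) == some q.2) : Int)

theorem pvCnt_nil (pat : List Int) (s : Int) : pvCnt pat [] s = 0 := by
  simp [pvCnt, PySem.List.enumerate_nil]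

theorem pvCnt_cons (pat : List Int) (a : Int) (answers : List Int) (s : Int) :
    pvCnt pat (a :: answers) s =
      (if PySem.List.pyGet? pat (PySem.Int.mod s (pat.length : Int)) == some a then 1 else 0)
        + pvCnt pat answers (s + 1) := by
  simp only [pvCnt, PySem.List.enumerate_cons, List.countP_cons]
  split <;> push_cast <;> ring

-- one step of A's inner loop over the three students, on a literal 3-key score dict
theorem pvStep (i x a b c : Int) :
    (PySem.Dict.mk [((1 : Int), [1, 2, 3, 4, 5]),
                    (2, [2, 1, 2, 3, 2, 4, 2, 5]),
                    (3, [3, 3, 1, 1, 2, 2, 4, 4, 5, 5])]).items.foldl (fun sc st =>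
        if PySem.List.pyGet? st.2 (PySem.Int.mod i (st.2.length : Int)) == some x
        then sc.modify st.1 0 (· + 1) else sc) (PySem.Dict.mk [(1, a), (2, b), (3, c)])
    = PySem.Dict.mk
        [(1, a + if PySem.List.pyGet? [1, 2, 3, 4, 5] (PySem.Int.mod i (([1,2,3,4,5] : List Int).length : Int)) == some x then 1 else 0),
         (2, b + if PySem.List.pyGet? [2, 1, 2, 3, 2, 4, 2, 5] (PySem.Int.mod i (([2,1,2,3,2,4,2,5] : List Int).length : Int)) == some x then 1 else 0),
         (3, c + if PySem.List.pyGet? [3, 3, 1, 1, 2, 2, 4, 4, 5, 5] (PySem.Int.mod i (([3,3,1,1,2,2,4,4,5,5] : List Int).length : Int)) == some x then 1 else 0)] := by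
  simp only [List.foldl_cons, List.foldl_nil]
  split_ifs <;>
    simp [PySem.Dict.modify, PySem.Dict.insert, PySem.Dict.getD, PySem.Dict.get?]

theorem pvMk3_eq {u v w u' v' w' : Int} (h1 : u = u') (h2 : v = v') (h3 : w = w') :
    PySem.Dict.mk [((1 : Int), u), (2, v), (3, w)] = PySem.Dict.mk [(1, u'), (2, v'), (3, w')] := by
  rw [h1, h2, h3]

-- A's interleaved fold just adds the three per-pattern counts
theorem pvA_fold (answers : List Int) : ∀ (s : Int) (a b c : Int),
    (PySem.List.enumerate answers s).foldl (fun sc q =>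
      (PySem.Dict.mk [((1 : Int), [1, 2, 3, 4, 5]),
                      (2, [2, 1, 2, 3, 2, 4, 2, 5]),
                      (3, [3, 3, 1, 1, 2, 2, 4, 4, 5, 5])]).items.foldl (fun sc st =>
        if PySem.List.pyGet? st.2 (PySem.Int.mod q.1 (st.2.length : Int)) == some q.2
        then sc.modify st.1 0 (· + 1) else sc) sc) (PySem.Dict.mk [(1, a), (2, b), (3, c)])
    = PySem.Dict.mk [(1, a + pvCnt [1, 2, 3, 4, 5] answers s),
                     (2, b + pvCnt [2, 1, 2, 3, 2, 4, 2, 5] answers s),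
                     (3, c + pvCnt [3, 3, 1, 1, 2, 2, 4, 4, 5, 5] answers s)] := by
  induction answers with
  | nil => intro s a b c; simp [PySem.List.enumerate_nil, pvCnt_nil]
  | cons x xs ih =>
    intro s a b c
    rw [PySem.List.enumerate_cons, List.foldl_cons]
    have hstep := pvStep s x a b c
    simp only [] at hstep ⊢
    rw [hstep, ih]
    exact pvMk3_eq (by rw [pvCnt_cons]; ring) (by rw [pvCnt_cons]; ring) (by rw [pvCnt_cons]; ring)

-- B's histogram fold is Counter of the keyed enumerate
theorem pvHist (answers : List Int) :
    (PySem.List.enumerate answers).foldl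
        (fun d q => d.insert (pvKey q) (d.getD (pvKey q) 0 + 1)) PySem.Dict.empty
      = PySem.Dict.counter ((PySem.List.enumerate answers).map pvKey) := by
  rw [← PySem.Dict.foldl_insert_getD_add_one_eq_counter, List.foldl_map]

-- B's simultaneous triple fold splits into three independent folds
theorem pvFold3 (pA pB pC : Int × Int → Bool) :
    ∀ (l : List ((Int × Int) × Int)) (a b c : Int),
      l.foldl (fun s q =>
          (if pA q.1 then s.1 + q.2 else s.1,
           if pB q.1 then s.2.1 + q.2 else s.2.1,
           if pC q.1 then s.2.2 + q.2 else s.2.2)) (a, b, c)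
        = (l.foldl (fun s q => if pA q.1 then s + q.2 else s) a,
           l.foldl (fun s q => if pB q.1 then s + q.2 else s) b,
           l.foldl (fun s q => if pC q.1 then s + q.2 else s) c) := by
  intro l
  induction l with
  | nil => intro a b c; rfl
  | cons x xs ih => intro a b c; simp only [List.foldl_cons]; exact ih _ _ _

-- a conditional-add fold is a sum of a 0/value map
theorem pvFoldSum (p : Int × Int → Bool) :
    ∀ (l : List ((Int × Int) × Int)) (c : Int),
      l.foldl (fun s q => if p q.1 then s + q.2 else s) c
        = c + (l.map (fun q => if p q.1 then q.2 else (0 : Int))).sum := by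
  intro l
  induction l with
  | nil => intro c; simp
  | cons x xs ih => intro c; simp only [List.foldl_cons, List.map_cons, List.sum_cons]; rw [ih]; split <;> ring

-- over a nodup list containing a, the indicator column sums to one hit
theorem pvHit {α : Type} [BEq α] [LawfulBEq α] (p : α → Bool) (a : α) :
    ∀ (D : List α), D.Nodup → a ∈ D →
      (D.map (fun k => if p k then (if k == a then (1 : Int) else 0) else 0)).sum
        = if p a then 1 else 0 := by
  intro D
  induction D with
  | nil => intro _ h; simp at h
  | cons d D' ih =>
    intro hnd hmem
    rw [List.nodup_cons] at hnd
    rw [List.map_cons, List.sum_cons]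
    rcases List.mem_cons.mp hmem with h | h
    · subst h
      have hz : (D'.map (fun k => if p k then (if k == a then (1 : Int) else 0) else 0)).sum = 0 := by
        rw [List.map_congr_left (g := fun _ => (0 : Int)), List.map_const', List.sum_replicate, smul_zero]
        intro k hk
        have : ¬ (k == a) = true := by simp; rintro rfl; exact hnd.1 hk
        simp [this]
      simp [hz]
    · have hda : ¬ (a == d) = true := by simp; rintro rfl; exact hnd.1 h
      have : (d == a) = false := by simp at hda ⊢; exact fun e => hda e.symm
      simp only [this, Bool.false_eq_true, if_false, ite_self, zero_add]
      exact ih hnd.2 h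

-- weighting each distinct key by its multiplicity counts the whole list
theorem pvSum {α : Type} [BEq α] [LawfulBEq α] (p : α → Bool) :
    ∀ (K D : List α), D.Nodup → (∀ x ∈ K, x ∈ D) →
      (D.map (fun k => if p k then ((K.count k : Nat) : Int) else 0)).sum = (K.countP p : Int) := by
  intro K
  induction K with
  | nil => intro D _ _; simp
  | cons a K' ih =>
    intro D hnd hsub
    have hsplit : (D.map (fun k => if p k then (((a :: K').count k : Nat) : Int) else 0))
        = D.map (fun k => (if p k then ((K'.count k : Nat) : Int) else 0)
                          + (if p k then (if k == a then (1 : Int) else 0) else 0)) := by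
      apply List.map_congr_left
      intro k _
      rw [List.count_cons]
      by_cases hk : k = a
      · subst hk
        simp only [beq_self_eq_true, if_true]
        split <;> push_cast <;> ring
      · have h1 : (a == k) = false := by simp; exact fun e => hk e.symm
        have h2 : (k == a) = false := by simp [hk]
        simp only [h1, h2, Bool.false_eq_true, if_false, add_zero, ite_self]
    rw [hsplit, List.sum_map_add (l := D), ih D hnd (fun x hx => hsub x (List.mem_cons_of_mem a hx)),
        pvHit p a D hnd (hsub a List.mem_cons_self), List.countP_cons]
    split <;> push_cast <;> ring

-- one pattern's score, as computed by B from the histogram, is A's per-pattern count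
theorem pvScore (pat : List Int) (len : Int) (hlen : (pat.length : Int) = len)
    (hpos : (0 : Int) < len) (hdvd : len ∣ 40) (answers : List Int) :
    (PySem.Dict.counter ((PySem.List.enumerate answers).map pvKey)).items.foldl
        (fun s q => if pvMatch pat len q.1 then s + q.2 else s) 0
      = pvCnt pat answers 0 := by
  rw [pvFoldSum, PySem.Dict.items_counter, List.map_map, zero_add]
  have hcomp : ((fun (q : (Int × Int) × Int) => if pvMatch pat len q.1 then q.2 else (0 : Int))
      ∘ fun k => (k, ((((PySem.List.enumerate answers).map pvKey).count k : Nat) : Int)))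
      = fun k => if pvMatch pat len k then ((((PySem.List.enumerate answers).map pvKey).count k : Nat) : Int) else 0 := rfl
  rw [hcomp,
      pvSum (pvMatch pat len) ((PySem.List.enumerate answers).map pvKey)
        (PySem.Set.ofList ((PySem.List.enumerate answers).map pvKey))
        (PySem.Set.nodup_ofList _)
        (fun x hx => (PySem.Set.mem_ofList _ x).mpr hx),
      List.countP_map]
  unfold pvCnt
  congr 1
  apply List.countP_congr
  intro q _
  simp only [Function.comp_apply, pvMatch, pvKey]
  rw [hlen]
  have h40 : PySem.Int.mod q.1 40 = q.1 % 40 := PySem.Int.mod_eq_emod_of_pos (by norm_num)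
  have hl1 : PySem.Int.mod (q.1 % 40) len = q.1 % 40 % len := PySem.Int.mod_eq_emod_of_pos hpos
  have hl2 : PySem.Int.mod q.1 len = q.1 % len := PySem.Int.mod_eq_emod_of_pos hpos
  rw [h40, hl1, hl2, Int.emod_emod_of_dvd q.1 hdvd]

-- Python's max(s1, s2, s3) equals A's max over the three score values
theorem pvMax3 (a b c : Int) :
    (PySem.List.max? [a, b, c] (fun x => x)).getD 0 = max a (max b c) := by
  simp only [PySem.List.max?, List.foldl_cons, List.foldl_nil]
  split_ifs <;> dsimp only <;> split_ifs <;> simp [max_def] <;> omega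

-- ===== VERDICT (by name: the statement is the Claim_ definition above) =====
theorem solution_spec : Claim_equal_solution := by
  unfold Claim_equal_solution
  intro answers _
  unfold Spec_solution solution solution_alt
  simp only []
  rw [pvA_fold answers 0 0 0 0, pvHist answers,
      pvFold3 (pvMatch [1, 2, 3, 4, 5] 5) (pvMatch [2, 1, 2, 3, 2, 4, 2, 5] 8)
              (pvMatch [3, 3, 1, 1, 2, 2, 4, 4, 5, 5] 10),
      pvScore [1, 2, 3, 4, 5] 5 (by norm_num) (by norm_num) (by norm_num) answers,
      pvScore [2, 1, 2, 3, 2, 4, 2, 5] 8 (by norm_num) (by norm_num) (by norm_num) answers,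
      pvScore [3, 3, 1, 1, 2, 2, 4, 4, 5, 5] 10 (by norm_num) (by norm_num) (by norm_num) answers]
  simp only [zero_add, PySem.Dict.values_mk, List.map_cons, List.map_nil]
  rw [pvMax3]
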